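-- pv_equiv track=rewrite | github.com/joewarrior1214/MarcusAGI | core/reasoning/advanced_cognitive_modules.py | _cluster_concepts
-- ===== SOURCE A (Python) =====
-- from typing import Dict, List, Optional, Tuple, Any, Set, Union, Callable
--
-- def _cluster_concepts(concepts: List[str]) -> Dict[str, List[str]]:
--     """Group related concepts into clusters."""
--     clusters = {
--         "cognitive": [],
--         "learning": [],
--         "reasoning": [],
--         "memory": [],
--         "general": []
--     }
--
--     cognitive_words = {"neural", "symbolic", "cognitive", "intelligence", "think"}
--     learning_words = {"learn", "study", "understand", "knowledge"}
--     reasoning_words = {"reason", "logic", "analyze", "solve", "problem"}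
--     memory_words = {"memory", "recall", "remember", "store"}
--
--     for concept in concepts:
--         if concept in cognitive_words:
--             clusters["cognitive"].append(concept)
--         elif concept in learning_words:
--             clusters["learning"].append(concept)
--         elif concept in reasoning_words:
--             clusters["reasoning"].append(concept)
--         elif concept in memory_words:
--             clusters["memory"].append(concept)
--         else:
--             clusters["general"].append(concept)
--
--     # Remove empty clusters
--     return {k: v for k, v in clusters.items() if v}
-- ===== SOURCE B (Python) =====
-- def _cluster_concepts(concepts):
--     """Group related concepts into clusters (one filter pass per category)."""
--     keyword_sets = [
--         ("cognitive", {"neural", "symbolic", "cognitive", "intelligence", "think"}),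
--         ("learning", {"learn", "study", "understand", "knowledge"}),
--         ("reasoning", {"reason", "logic", "analyze", "solve", "problem"}),
--         ("memory", {"memory", "recall", "remember", "store"}),
--     ]
--
--     def category(word):
--         for name, words in keyword_sets:
--             if word in words:
--                 return name
--         return "general"
--
--     result = {}
--     for name in ("cognitive", "learning", "reasoning", "memory", "general"):
--         members = [c for c in concepts if category(c) == name]
--         if members:
--             result[name] = members
--     return result
-- ===== Notes on version B (the rewrite author's own statement) =====
-- stated objective: alternative
-- what changed: Replaces A's single mutating pass that appends into a pre-built dict of five bucket lists with staged passes: a first-match classifier function plus one filter pass per category, building the result dict directly with only non-empty entries (trades one pass for five to avoid the mutable bucket dict).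
import Mathlib
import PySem

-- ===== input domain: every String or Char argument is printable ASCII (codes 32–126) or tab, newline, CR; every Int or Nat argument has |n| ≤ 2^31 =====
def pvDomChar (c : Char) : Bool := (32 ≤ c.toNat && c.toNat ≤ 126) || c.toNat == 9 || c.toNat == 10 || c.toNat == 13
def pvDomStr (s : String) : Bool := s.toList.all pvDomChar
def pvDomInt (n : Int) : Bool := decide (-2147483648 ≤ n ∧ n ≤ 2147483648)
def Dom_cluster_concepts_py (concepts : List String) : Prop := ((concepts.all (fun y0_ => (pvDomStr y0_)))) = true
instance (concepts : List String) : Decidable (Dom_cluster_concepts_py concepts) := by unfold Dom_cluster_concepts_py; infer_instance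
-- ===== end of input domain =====

-- B replaces A's single mutating pass over a pre-built five-bucket dict with staged passes:
-- a first-match classifier and one filter pass per category (objective: alternative, same O(n) cost); same dict proved.


-- ===== PORT A =====
-- loop body of A's for-loop: the if/elif chain over the four keyword sets, appending into the dict
def pvStepA (d : PySem.Dict String (List String)) (concept : String) : PySem.Dict String (List String) :=
  if (PySem.Set.ofList ["neural", "symbolic", "cognitive", "intelligence", "think"]).contains concept then
    d.modify "cognitive" [] (· ++ [concept])
  else if (PySem.Set.ofList ["learn", "study", "understand", "knowledge"]).contains concept then
    d.modify "learning" [] (· ++ [concept])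
  else if (PySem.Set.ofList ["reason", "logic", "analyze", "solve", "problem"]).contains concept then
    d.modify "reasoning" [] (· ++ [concept])
  else if (PySem.Set.ofList ["memory", "recall", "remember", "store"]).contains concept then
    d.modify "memory" [] (· ++ [concept])
  else
    d.modify "general" [] (· ++ [concept])

def cluster_concepts_py (concepts : List String) : List (String × List String) :=
  let clusters : PySem.Dict String (List String) :=
    PySem.Dict.ofList [("cognitive", []), ("learning", []), ("reasoning", []), ("memory", []), ("general", [])]
  let final := concepts.foldl pvStepA clusters
  -- {k: v for k, v in final.items() if v}
  final.items.filter (fun kv => !kv.2.isEmpty)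

-- ===== PORT B =====
-- Source B's keyword_sets list of (category, keyword set)
def pvKeywordSets : List (String × PySem.Set String) :=
  [("cognitive", PySem.Set.ofList ["neural", "symbolic", "cognitive", "intelligence", "think"]),
   ("learning", PySem.Set.ofList ["learn", "study", "understand", "knowledge"]),
   ("reasoning", PySem.Set.ofList ["reason", "logic", "analyze", "solve", "problem"]),
   ("memory", PySem.Set.ofList ["memory", "recall", "remember", "store"])]

-- Source B's `category` for-loop with early return, as structural recursion over keyword_sets
def pvCategoryLoop : List (String × PySem.Set String) → String → String
  | [], _ => "general"
  | (name, words) :: rest, w => if words.contains w then name else pvCategoryLoop rest w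

def pvCategory (word : String) : String := pvCategoryLoop pvKeywordSets word

-- staged passes: for each category name, one filter pass; keep only non-empty member lists
def cluster_concepts_py_alt (concepts : List String) : List (String × List String) :=
  (["cognitive", "learning", "reasoning", "memory", "general"].map
      (fun name => (name, concepts.filter (fun c => pvCategory c == name)))).filter
    (fun kv => !kv.2.isEmpty)

-- ===== PRECONDITION & SPEC =====
def Spec_cluster_concepts_py (concepts : List String) (out : List (String × List String)) : Prop := out = cluster_concepts_py_alt concepts
instance (concepts : List String) (out : List (String × List String)) : Decidable (Spec_cluster_concepts_py concepts out) := by unfold Spec_cluster_concepts_py; infer_instance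

-- ===== CLAIM (what is proved, stated in full; the proofs are below) =====
def Claim_equal_cluster_concepts_py : Prop := ∀ (concepts : List String), Dom_cluster_concepts_py concepts → Spec_cluster_concepts_py concepts (cluster_concepts_py concepts)

-- ===== LEMMAS AND PROOFS =====

-- computing Dict.modify at each of the five literal keys (the values are carried along)
theorem pvMod_cog (a b c d e l : List String) (x : String) :
    (PySem.Dict.mk [("cognitive", a), ("learning", b), ("reasoning", c), ("memory", d), ("general", e)]).modify "cognitive" l (· ++ [x])
    = PySem.Dict.mk [("cognitive", a ++ [x]), ("learning", b), ("reasoning", c), ("memory", d), ("general", e)] := rfl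
theorem pvMod_lea (a b c d e l : List String) (x : String) :
    (PySem.Dict.mk [("cognitive", a), ("learning", b), ("reasoning", c), ("memory", d), ("general", e)]).modify "learning" l (· ++ [x])
    = PySem.Dict.mk [("cognitive", a), ("learning", b ++ [x]), ("reasoning", c), ("memory", d), ("general", e)] := rfl
theorem pvMod_rea (a b c d e l : List String) (x : String) :
    (PySem.Dict.mk [("cognitive", a), ("learning", b), ("reasoning", c), ("memory", d), ("general", e)]).modify "reasoning" l (· ++ [x])
    = PySem.Dict.mk [("cognitive", a), ("learning", b), ("reasoning", c ++ [x]), ("memory", d), ("general", e)] := rfl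
theorem pvMod_mem (a b c d e l : List String) (x : String) :
    (PySem.Dict.mk [("cognitive", a), ("learning", b), ("reasoning", c), ("memory", d), ("general", e)]).modify "memory" l (· ++ [x])
    = PySem.Dict.mk [("cognitive", a), ("learning", b), ("reasoning", c), ("memory", d ++ [x]), ("general", e)] := rfl
theorem pvMod_gen (a b c d e l : List String) (x : String) :
    (PySem.Dict.mk [("cognitive", a), ("learning", b), ("reasoning", c), ("memory", d), ("general", e)]).modify "general" l (· ++ [x])
    = PySem.Dict.mk [("cognitive", a), ("learning", b), ("reasoning", c), ("memory", d), ("general", e ++ [x])] := rfl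

-- A's if/elif chain appends the concept to exactly the bucket B's classifier names
theorem pvStepA_eq_modify (d : PySem.Dict String (List String)) (x : String) :
    pvStepA d x = d.modify (pvCategory x) [] (· ++ [x]) := by
  unfold pvStepA pvCategory pvKeywordSets
  simp only [pvCategoryLoop]
  split_ifs <;> rfl

-- B's classifier only ever returns one of the five category names
theorem pvCategory_cases (x : String) :
    pvCategory x = "cognitive" ∨ pvCategory x = "learning" ∨ pvCategory x = "reasoning" ∨
    pvCategory x = "memory" ∨ pvCategory x = "general" := by
  unfold pvCategory pvKeywordSets
  simp only [pvCategoryLoop]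
  split_ifs <;> simp

-- invariant of A's fold: each bucket accumulates exactly the concepts B's classifier sends there
theorem pvFold_inv (l : List String) (a b c d e : List String) :
    l.foldl pvStepA (PySem.Dict.mk
        [("cognitive", a), ("learning", b), ("reasoning", c), ("memory", d), ("general", e)])
    = PySem.Dict.mk
        [("cognitive", a ++ l.filter (fun x => pvCategory x == "cognitive")),
         ("learning", b ++ l.filter (fun x => pvCategory x == "learning")),
         ("reasoning", c ++ l.filter (fun x => pvCategory x == "reasoning")),
         ("memory", d ++ l.filter (fun x => pvCategory x == "memory")),
         ("general", e ++ l.filter (fun x => pvCategory x == "general"))] := by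
  induction l generalizing a b c d e with
  | nil => simp
  | cons x xs ih =>
    rw [List.foldl_cons, pvStepA_eq_modify]
    rcases pvCategory_cases x with h | h | h | h | h <;>
      rw [h] <;>
      (first | rw [pvMod_cog] | rw [pvMod_lea] | rw [pvMod_rea] | rw [pvMod_mem] | rw [pvMod_gen]) <;>
      rw [ih] <;>
      simp [h, List.append_assoc]

-- ===== VERDICT (by name: the statement is the Claim_ definition above) =====
theorem cluster_concepts_py_spec : Claim_equal_cluster_concepts_py := by
  intro concepts _
  unfold Spec_cluster_concepts_py
  show (List.foldl pvStepA (PySem.Dict.mk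
      [("cognitive", []), ("learning", []), ("reasoning", []), ("memory", []), ("general", [])]) concepts).items.filter
      (fun kv => !kv.2.isEmpty) = cluster_concepts_py_alt concepts
  rw [pvFold_inv]
  simp [cluster_concepts_py_alt]
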